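-- pv_equiv track=rewrite | github.com/avg16/cp-dsa | codeforces/A_Shape_Perimeter.py | calculate_perimeter
-- ===== SOURCE A (Python) =====
-- def calculate_perimeter(n, m, moves):
--     from collections import defaultdict
--
--     colored_cells = set()
--
--     def fill_square(x, y):
--         for i in range(m):
--             for j in range(m):
--                 colored_cells.add((x + i, y + j))
--     curr_x, curr_y = 0, 0
--     for x_move, y_move in moves:
--         curr_x += x_move
--         curr_y += y_move
--         fill_square(curr_x, curr_y)
--
--     perimeter = 0
--     directions = [(0, 1), (1, 0), (0, -1), (-1, 0)]
--
--     for cell in colored_cells: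
--         x, y = cell
--         for dx, dy in directions:
--             neighbor = (x + dx, y + dy)
--             if neighbor not in colored_cells:
--                 perimeter += 1
--
--     return perimeter
-- ===== SOURCE B (Python) =====
-- def calculate_perimeter(n, m, moves):
--     from collections import Counter
--     from itertools import accumulate
--     positions = list(accumulate(moves, lambda p, d: (p[0] + d[0], p[1] + d[1]),
--                                 initial=(0, 0)))[1:]
--     cells = {(x + i, y + j) for x, y in positions for i in range(m) for j in range(m)}
--     # Count every unit grid edge of every cell; an edge interior to the region is
--     # counted twice (once from each side), a boundary edge exactly once.
--     edges = Counter()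
--     for x, y in cells:
--         edges['H', x, y] += 1
--         edges['H', x + 1, y] += 1
--         edges['V', x, y] += 1
--         edges['V', x, y + 1] += 1
--     return sum(1 for v in edges.values() if v == 1)
-- ===== Notes on version B (the rewrite author's own statement) =====
-- stated objective: alternative
-- what changed: B replaces A's per-cell four-direction neighbour membership scan by an edge-multiset method: it puts all four unit edges of every covered cell into a Counter keyed by edge, and the perimeter is the number of edges whose count is 1 (interior edges are counted twice, boundary edges once); no neighbour lookup into the cell set is performed.
import Mathlib
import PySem

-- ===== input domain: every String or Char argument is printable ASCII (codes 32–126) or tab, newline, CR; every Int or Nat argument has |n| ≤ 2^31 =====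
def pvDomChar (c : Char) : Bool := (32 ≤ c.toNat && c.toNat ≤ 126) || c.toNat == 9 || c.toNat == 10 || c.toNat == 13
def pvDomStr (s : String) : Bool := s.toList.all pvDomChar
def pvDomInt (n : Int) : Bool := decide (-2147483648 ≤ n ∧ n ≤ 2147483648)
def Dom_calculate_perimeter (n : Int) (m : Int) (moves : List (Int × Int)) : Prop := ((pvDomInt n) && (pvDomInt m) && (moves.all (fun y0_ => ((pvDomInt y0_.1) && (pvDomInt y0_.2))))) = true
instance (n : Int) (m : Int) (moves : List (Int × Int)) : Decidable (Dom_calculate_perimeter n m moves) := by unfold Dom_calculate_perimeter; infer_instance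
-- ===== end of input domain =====

-- B replaces A's per-cell four-direction neighbour scan by an edge-multiset method:
-- every covered cell contributes its four unit edges to a Counter, and the perimeter is
-- the number of edges counted exactly once; objective: alternative.
-- Python's set is Std.HashSet and Counter is Std.HashMap (hash containers, like CPython's).
-- This is exact here: both programs consume them order-independently (A sums over the set,
-- B reads only the multiset of counter values); B's 'for v in edges.values()' is ported as
-- a fold over the stored (key, value) pairs reading the value.

-- ===== PORT A =====
-- fill_square(x, y): 'for i in range(m): for j in range(m): colored_cells.add((x+i, y+j))'
def pvFillSquare (m x y : Int) (s : Std.HashSet (Int × Int)) : Std.HashSet (Int × Int) :=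
  (PySem.List.pyRange 0 m 1).foldl (fun s i =>
    (PySem.List.pyRange 0 m 1).foldl (fun s j => s.insert (x + i, y + j)) s) s

def calculate_perimeter (n : Int) (m : Int) (moves : List (Int × Int)) : Int :=
  -- 'for x_move, y_move in moves: curr_x += x_move; curr_y += y_move; fill_square(curr_x, curr_y)'
  let st := moves.foldl
    (fun (st : Int × Int × Std.HashSet (Int × Int)) mv =>
      (st.1 + mv.1, st.2.1 + mv.2, pvFillSquare m (st.1 + mv.1) (st.2.1 + mv.2) st.2.2))
    (0, 0, (∅ : Std.HashSet (Int × Int)))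
  let colored := st.2.2
  -- 'for cell in colored_cells: for dx, dy in directions: …' — the summed result is
  -- independent of the set's iteration order, so folding the element list is exact
  colored.toList.foldl (fun per c =>
    [((0:Int), (1:Int)), (1, 0), (0, -1), (-1, 0)].foldl
      (fun per d =>
        if colored.contains (c.1 + d.1, c.2 + d.2) then per else per + 1) per) 0

-- ===== PORT B =====
-- positions = list(accumulate(moves, lambda p, d: (p[0]+d[0], p[1]+d[1]), initial=(0,0)))[1:]
def pvPositions (moves : List (Int × Int)) : List (Int × Int) :=
  (moves.scanl (fun p d => (p.1 + d.1, p.2 + d.2)) ((0 : Int), (0 : Int))).drop 1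

-- the cells one square contributes, as generated by the comprehension's two inner 'for's
def pvSquareCells (m : Int) (p : Int × Int) : List (Int × Int) :=
  (PySem.List.pyRange 0 m 1).flatMap fun i =>
    (PySem.List.pyRange 0 m 1).map fun j => (p.1 + i, p.2 + j)

-- the four Counter keys one cell contributes: ('H',x,y), ('H',x+1,y), ('V',x,y), ('V',x,y+1)
def pvCellEdges (c : Int × Int) : List (String × Int × Int) :=
  [("H", c.1, c.2), ("H", c.1 + 1, c.2), ("V", c.1, c.2), ("V", c.1, c.2 + 1)]

def calculate_perimeter_alt (n : Int) (m : Int) (moves : List (Int × Int)) : Int :=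
  -- cells = {(x+i, y+j) for x, y in positions for i in range(m) for j in range(m)}
  let cells : Std.HashSet (Int × Int) :=
    ((pvPositions moves).flatMap (pvSquareCells m)).foldl (fun s c => s.insert c) ∅
  -- 'for x, y in cells: edges[k] += 1' for the four edge keys (Counter update);
  -- the counter built does not depend on the set's iteration order
  let edges : Std.HashMap (String × Int × Int) Int :=
    cells.toList.foldl (fun d c =>
      (pvCellEdges c).foldl (fun d k => d.insert k (d.getD k 0 + 1)) d) ∅
  -- sum(1 for v in edges.values() if v == 1), iterating the stored pairs
  edges.toList.foldl (fun s kv => if kv.2 == 1 then s + 1 else s) 0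

-- ===== PRECONDITION & SPEC =====
def Spec_calculate_perimeter (n : Int) (m : Int) (moves : List (Int × Int)) (out : Int) : Prop := out = calculate_perimeter_alt n m moves
instance (n : Int) (m : Int) (moves : List (Int × Int)) (out : Int) : Decidable (Spec_calculate_perimeter n m moves out) := by unfold Spec_calculate_perimeter; infer_instance

-- ===== CLAIM (what is proved, stated in full; the proofs are below) =====
def Claim_equal_calculate_perimeter : Prop := ∀ (n : Int) (m : Int) (moves : List (Int × Int)), Dom_calculate_perimeter n m moves → Spec_calculate_perimeter n m moves (calculate_perimeter n m moves)

-- ===== LEMMAS AND PROOFS =====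

-- ---- the hash set of cells: membership and distinctness of its element list ----

lemma pv_contains_eq (s : Std.HashSet (Int × Int)) (z : Int × Int) :
    s.contains z = decide (z ∈ s.toList) := by
  by_cases h : z ∈ s <;> simp [h, Std.HashSet.mem_toList]

lemma pv_toList_nodup (s : Std.HashSet (Int × Int)) : s.toList.Nodup := by
  have := @Std.HashSet.distinct_toList (Int × Int) _ _ s _ _
  exact this.imp (by intro a b hab heq; subst heq; simp at hab)

lemma pv_mem_foldl_insert {α : Type} (l : List α) (f : α → Int × Int)
    (s : Std.HashSet (Int × Int)) (c : Int × Int) :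
    c ∈ l.foldl (fun s a => s.insert (f a)) s ↔ c ∈ s ∨ c ∈ l.map f := by
  induction l generalizing s with
  | nil => simp
  | cons a t ih =>
      rw [List.foldl_cons, ih, Std.HashSet.mem_insert]
      have hba : ((f a == c) = true) ↔ c = f a := by rw [beq_iff_eq]; exact eq_comm
      simp only [List.map_cons, List.mem_cons, hba]
      tauto

lemma pv_mem_fill (m x y : Int) (s : Std.HashSet (Int × Int)) (c : Int × Int) :
    c ∈ pvFillSquare m x y s ↔ c ∈ s ∨ c ∈ pvSquareCells m (x, y) := by
  unfold pvFillSquare pvSquareCells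
  have aux : ∀ (I : List Int) (s : Std.HashSet (Int × Int)),
      c ∈ I.foldl (fun s i => (PySem.List.pyRange 0 m 1).foldl
        (fun s j => s.insert (x + i, y + j)) s) s ↔
      c ∈ s ∨ c ∈ I.flatMap (fun i => (PySem.List.pyRange 0 m 1).map fun j => (x + i, y + j)) := by
    intro I
    induction I with
    | nil => simp
    | cons a t ih =>
        intro s
        simp [ih, pv_mem_foldl_insert (PySem.List.pyRange 0 m 1) (fun j => (x + a, y + j)) s c]
        exact or_assoc
  exact aux _ s

lemma pv_foldA_mem (m : Int) (moves : List (Int × Int)) (cx cy : Int)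
    (s : Std.HashSet (Int × Int)) (c : Int × Int) :
    c ∈ (moves.foldl
      (fun (st : Int × Int × Std.HashSet (Int × Int)) mv =>
        (st.1 + mv.1, st.2.1 + mv.2, pvFillSquare m (st.1 + mv.1) (st.2.1 + mv.2) st.2.2))
      (cx, cy, s)).2.2 ↔
      c ∈ s ∨ c ∈ ((moves.scanl (fun p d => (p.1 + d.1, p.2 + d.2)) (cx, cy)).drop 1).flatMap
        (pvSquareCells m) := by
  induction moves generalizing cx cy s with
  | nil => simp
  | cons mv rest ih =>
      simp only [List.foldl_cons, List.scanl_cons, List.drop_succ_cons, List.drop_zero]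
      rw [show (List.scanl (fun p d => (p.1 + d.1, p.2 + d.2)) ((cx, cy).1 + mv.1, (cx, cy).2 + mv.2) rest)
            = ((cx + mv.1, cy + mv.2) :: (List.scanl (fun p d => (p.1 + d.1, p.2 + d.2)) (cx + mv.1, cy + mv.2) rest).drop 1) from ?_]
      · rw [List.flatMap_cons, ih]
        simp [pv_mem_fill]
        tauto
      · cases rest <;> simp

-- ---- A's summation loop as four missing-neighbour counts ----

lemma pv_sum_missing (L M : List (Int × Int)) :
    L.foldl (fun per c =>
      [((0:Int), (1:Int)), (1, 0), (0, -1), (-1, 0)].foldl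
        (fun per d =>
          if (c.1 + d.1, c.2 + d.2) ∈ M then per else per + 1) per) 0 =
    (L.countP (fun c => !decide ((c.1, c.2 + 1) ∈ M)) : Int)
      + (L.countP (fun c => !decide ((c.1 + 1, c.2) ∈ M)) : Int)
      + (L.countP (fun c => !decide ((c.1, c.2 - 1) ∈ M)) : Int)
      + (L.countP (fun c => !decide ((c.1 - 1, c.2) ∈ M)) : Int) := by
  have step : ∀ (per : Int) (c : Int × Int),
      [((0:Int), (1:Int)), (1, 0), (0, -1), (-1, 0)].foldl
        (fun per d =>
          if (c.1 + d.1, c.2 + d.2) ∈ M then per else per + 1) per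
      = per + ((if (c.1, c.2 + 1) ∈ M then (0:Int) else 1)
        + (if (c.1 + 1, c.2) ∈ M then (0:Int) else 1)
        + (if (c.1, c.2 - 1) ∈ M then (0:Int) else 1)
        + (if (c.1 - 1, c.2) ∈ M then (0:Int) else 1)) := by
    intro per c
    have e1 : (c.1 + (0:Int), c.2 + (1:Int)) = (c.1, c.2 + 1) := by
      simp; try omega
    have e2 : (c.1 + (1:Int), c.2 + (0:Int)) = (c.1 + 1, c.2) := by
      simp; try omega
    have e3 : (c.1 + (0:Int), c.2 + (-1:Int)) = (c.1, c.2 - 1) := by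
      simp; try omega
    have e4 : (c.1 + (-1:Int), c.2 + (0:Int)) = (c.1 - 1, c.2) := by
      simp; try omega
    simp only [List.foldl, e1, e2, e3, e4]
    split_ifs <;> ring
  have hcongr := PySem.List.foldl_congr_mem L
    (fun per c =>
      [((0:Int), (1:Int)), (1, 0), (0, -1), (-1, 0)].foldl
        (fun per d =>
          if (c.1 + d.1, c.2 + d.2) ∈ M then per else per + 1) per)
    (fun per c => per + ((if (c.1, c.2 + 1) ∈ M then (0:Int) else 1)
        + (if (c.1 + 1, c.2) ∈ M then (0:Int) else 1)
        + (if (c.1, c.2 - 1) ∈ M then (0:Int) else 1)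
        + (if (c.1 - 1, c.2) ∈ M then (0:Int) else 1)))
    0 (fun acc x _ => step acc x)
  have sum_eq : ∀ (l : List (Int × Int)),
      (l.map (fun c => (if (c.1, c.2 + 1) ∈ M then (0:Int) else 1)
        + (if (c.1 + 1, c.2) ∈ M then (0:Int) else 1)
        + (if (c.1, c.2 - 1) ∈ M then (0:Int) else 1)
        + (if (c.1 - 1, c.2) ∈ M then (0:Int) else 1))).sum =
      (l.countP (fun c => !decide ((c.1, c.2 + 1) ∈ M)) : Int)
        + (l.countP (fun c => !decide ((c.1 + 1, c.2) ∈ M)) : Int)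
        + (l.countP (fun c => !decide ((c.1, c.2 - 1) ∈ M)) : Int)
        + (l.countP (fun c => !decide ((c.1 - 1, c.2) ∈ M)) : Int) := by
    intro l
    induction l with
    | nil => simp
    | cons a t ih =>
        simp only [List.map_cons, List.sum_cons, List.countP_cons, ih]
        by_cases h1 : (a.1, a.2 + 1) ∈ M <;>
        by_cases h2 : (a.1 + 1, a.2) ∈ M <;>
        by_cases h3 : (a.1, a.2 - 1) ∈ M <;>
        by_cases h4 : (a.1 - 1, a.2) ∈ M <;>
          simp only [h1, h2, h3, h4, if_true, if_false, decide_true, decide_false,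
            Bool.not_true, Bool.not_false] <;> push_cast <;> omega
  refine hcongr.trans ?_
  rw [PySem.List.foldl_add, sum_eq L]
  ring

-- ---- edge-multiset counting: the mathematical core ----

lemma pv_count_nodup {α : Type} [BEq α] [LawfulBEq α] (L : List α) (hL : L.Nodup) (u : α) :
    L.count u = if u ∈ L then 1 else 0 := by
  by_cases h : u ∈ L
  · rw [if_pos h]; exact List.count_eq_one_of_mem hL h
  · rw [if_neg h]; exact List.count_eq_zero_of_not_mem h

lemma pv_edges_nodup (c : Int × Int) : (pvCellEdges c).Nodup := by
  simp [pvCellEdges, Prod.ext_iff]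

lemma pv_countE (L : List (Int × Int)) (k : String × Int × Int) :
    (L.flatMap pvCellEdges).count k = L.countP (fun c => decide (k ∈ pvCellEdges c)) := by
  induction L with
  | nil => rfl
  | cons a t ih =>
      simp only [List.flatMap_cons, List.count_append, List.countP_cons, ih,
        pv_count_nodup _ (pv_edges_nodup a) k]
      by_cases h : k ∈ pvCellEdges a
      · simp [h, Nat.add_comm]
      · simp [h]

lemma pv_mem_edges_H (c : Int × Int) (a b : Int) :
    ("H", a, b) ∈ pvCellEdges c ↔ c = (a, b) ∨ c = (a - 1, b) := by
  simp [pvCellEdges, Prod.ext_iff]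
  constructor
  · rintro (⟨h1, h2⟩ | ⟨h1, h2⟩) <;> [left; right] <;> omega
  · rintro (⟨h1, h2⟩ | ⟨h1, h2⟩) <;> [left; right] <;> omega

lemma pv_mem_edges_V (c : Int × Int) (a b : Int) :
    ("V", a, b) ∈ pvCellEdges c ↔ c = (a, b) ∨ c = (a, b - 1) := by
  simp [pvCellEdges, Prod.ext_iff]
  constructor
  · rintro (⟨h1, h2⟩ | ⟨h1, h2⟩) <;> [left; right] <;> omega
  · rintro (⟨h1, h2⟩ | ⟨h1, h2⟩) <;> [left; right] <;> omega

lemma pv_countP_pair (L : List (Int × Int)) (u v : Int × Int) (huv : u ≠ v) :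
    L.countP (fun c => decide (c = u ∨ c = v)) = L.count u + L.count v := by
  induction L with
  | nil => simp
  | cons a t ih =>
      simp only [List.countP_cons, List.count_cons, ih]
      by_cases h1 : a = u <;> by_cases h2 : a = v <;>
        simp [h1, h2, huv, Ne.symm huv] <;> omega

lemma pv_countE_H (L : List (Int × Int)) (hL : L.Nodup) (a b : Int) :
    (L.flatMap pvCellEdges).count ("H", a, b) =
    (if (a, b) ∈ L then 1 else 0) + (if (a - 1, b) ∈ L then 1 else 0) := by
  have hc : L.countP (fun c => decide (("H", a, b) ∈ pvCellEdges c)) =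
      L.countP (fun c => decide (c = (a, b) ∨ c = (a - 1, b))) :=
    List.countP_congr (fun c _ => by simp only [pv_mem_edges_H])
  rw [pv_countE, hc,
    pv_countP_pair L _ _ (by intro h; injection h with h1 h2; omega),
    pv_count_nodup L hL, pv_count_nodup L hL]

lemma pv_countE_V (L : List (Int × Int)) (hL : L.Nodup) (a b : Int) :
    (L.flatMap pvCellEdges).count ("V", a, b) =
    (if (a, b) ∈ L then 1 else 0) + (if (a, b - 1) ∈ L then 1 else 0) := by
  have hc : L.countP (fun c => decide (("V", a, b) ∈ pvCellEdges c)) =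
      L.countP (fun c => decide (c = (a, b) ∨ c = (a, b - 1))) :=
    List.countP_congr (fun c _ => by simp only [pv_mem_edges_V])
  rw [pv_countE, hc,
    pv_countP_pair L _ _ (by intro h; injection h with h1 h2; omega),
    pv_count_nodup L hL, pv_count_nodup L hL]

lemma pv_countP_card {α : Type} [DecidableEq α] (L : List α) (hL : L.Nodup) (p : α → Bool) :
    L.countP p = (L.toFinset.filter (fun c => p c = true)).card := by
  rw [List.countP_eq_length_filter, ← List.toFinset_card_of_nodup (hL.filter _),
    List.toFinset_filter]

-- the crux: distinct edges counted exactly once = the four missing-neighbour counts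
lemma pv_main (L : List (Int × Int)) (hL : L.Nodup) :
    (PySem.Set.ofList (L.flatMap pvCellEdges)).countP
        (fun k => (L.flatMap pvCellEdges).count k == 1) =
    L.countP (fun c => !decide ((c.1, c.2 + 1) ∈ L))
      + L.countP (fun c => !decide ((c.1 + 1, c.2) ∈ L))
      + L.countP (fun c => !decide ((c.1, c.2 - 1) ∈ L))
      + L.countP (fun c => !decide ((c.1 - 1, c.2) ∈ L)) := by
  have hmemS : ∀ c : Int × Int, c ∈ L.toFinset ↔ c ∈ L := fun c => List.mem_toFinset
  -- the four families of boundary edges, one per missing-neighbour direction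
  set F1 := (L.toFinset.filter (fun c => (!decide ((c.1, c.2 + 1) ∈ L)) = true)).image
    (fun c => (("V" : String), c.1, c.2 + 1)) with hF1
  set F2 := (L.toFinset.filter (fun c => (!decide ((c.1 + 1, c.2) ∈ L)) = true)).image
    (fun c => (("H" : String), c.1 + 1, c.2)) with hF2
  set F3 := (L.toFinset.filter (fun c => (!decide ((c.1, c.2 - 1) ∈ L)) = true)).image
    (fun c => (("V" : String), c.1, c.2)) with hF3
  set F4 := (L.toFinset.filter (fun c => (!decide ((c.1 - 1, c.2) ∈ L)) = true)).image
    (fun c => (("H" : String), c.1, c.2)) with hF4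
  have hLHS : (PySem.Set.ofList (L.flatMap pvCellEdges)).countP
      (fun k => (L.flatMap pvCellEdges).count k == 1)
      = ((L.flatMap pvCellEdges).toFinset.filter
          (fun k => ((L.flatMap pvCellEdges).count k == 1) = true)).card := by
    rw [pv_countP_card _ (PySem.Set.nodup_ofList _)]
    congr 1
    ext k
    simp [PySem.Set.mem_ofList]
  have key : (L.flatMap pvCellEdges).toFinset.filter
      (fun k => ((L.flatMap pvCellEdges).count k == 1) = true) = ((F1 ∪ F2) ∪ F3) ∪ F4 := by
    ext k
    obtain ⟨t, a, b⟩ := k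
    simp only [F1, F2, F3, F4, Finset.mem_filter, Finset.mem_union, Finset.mem_image,
      List.mem_toFinset, List.mem_flatMap, beq_iff_eq, Bool.not_eq_true',
      decide_eq_false_iff_not]
    constructor
    · rintro ⟨⟨c, hcL, hck⟩, hcount⟩
      have hck' : (t = "H" ∧ a = c.1 ∧ b = c.2) ∨ (t = "H" ∧ a = c.1 + 1 ∧ b = c.2)
          ∨ (t = "V" ∧ a = c.1 ∧ b = c.2) ∨ (t = "V" ∧ a = c.1 ∧ b = c.2 + 1) := by
        simpa [pvCellEdges, Prod.ext_iff] using hck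
      have ht : t = "H" ∨ t = "V" := by
        rcases hck' with ⟨h, _⟩ | ⟨h, _⟩ | ⟨h, _⟩ | ⟨h, _⟩
        · exact Or.inl h
        · exact Or.inl h
        · exact Or.inr h
        · exact Or.inr h
      rcases ht with rfl | rfl
      · rw [pv_countE_H L hL] at hcount
        by_cases h1 : (a, b) ∈ L <;> by_cases h2 : (a - 1, b) ∈ L
        · rw [if_pos h1, if_pos h2] at hcount; omega
        · exact Or.inr ⟨(a, b), ⟨h1, by simpa using h2⟩, rfl⟩
        · refine Or.inl (Or.inl (Or.inr ⟨(a - 1, b), ⟨h2, by simpa using h1⟩, ?_⟩))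
          simp only [Prod.mk.injEq, true_and, and_true]
          omega
        · rw [if_neg h1, if_neg h2] at hcount; omega
      · rw [pv_countE_V L hL] at hcount
        by_cases h1 : (a, b) ∈ L <;> by_cases h2 : (a, b - 1) ∈ L
        · rw [if_pos h1, if_pos h2] at hcount; omega
        · exact Or.inl (Or.inr ⟨(a, b), ⟨h1, by simpa using h2⟩, rfl⟩)
        · refine Or.inl (Or.inl (Or.inl ⟨(a, b - 1), ⟨h2, by simpa using h1⟩, ?_⟩))
          simp only [Prod.mk.injEq, true_and]
          omega
        · rw [if_neg h1, if_neg h2] at hcount; omega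
    · rintro (((⟨c, ⟨hcS, hq⟩, heq⟩ | ⟨c, ⟨hcS, hq⟩, heq⟩) | ⟨c, ⟨hcS, hq⟩, heq⟩) | ⟨c, ⟨hcS, hq⟩, heq⟩) <;>
        (injection heq with h1 h2; injection h2 with h2a h2b; subst h1; subst h2a; subst h2b) <;>
        refine ⟨⟨c, hcS, by simp [pvCellEdges]⟩, ?_⟩
      · have hb : ((c.1 : Int), c.2 + 1 - 1) = (c.1, c.2) := by simp
        rw [pv_countE_V L hL, hb, if_neg hq, if_pos hcS]
      · have hb : ((c.1 : Int) + 1 - 1, c.2) = (c.1, c.2) := by simp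
        rw [pv_countE_H L hL, hb, if_neg hq, if_pos hcS]
      · rw [pv_countE_V L hL, if_pos hcS, if_neg hq]
      · rw [pv_countE_H L hL, if_pos hcS, if_neg hq]
  have inj1 : Function.Injective (fun c : Int × Int => (("V" : String), c.1, c.2 + 1)) := by
    intro x y h
    obtain ⟨x1, x2⟩ := x; obtain ⟨y1, y2⟩ := y
    injection h with h1 h2; injection h2 with h2a h2b
    simp only [Prod.mk.injEq]
    exact ⟨h2a, by omega⟩
  have inj2 : Function.Injective (fun c : Int × Int => (("H" : String), c.1 + 1, c.2)) := by
    intro x y h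
    obtain ⟨x1, x2⟩ := x; obtain ⟨y1, y2⟩ := y
    injection h with h1 h2; injection h2 with h2a h2b
    simp only [Prod.mk.injEq]
    exact ⟨by omega, h2b⟩
  have inj3 : Function.Injective (fun c : Int × Int => (("V" : String), c.1, c.2)) := by
    intro x y h
    injection h with h1 h2
  have inj4 : Function.Injective (fun c : Int × Int => (("H" : String), c.1, c.2)) := by
    intro x y h
    injection h with h1 h2
  have d12 : Disjoint F1 F2 := by
    rw [Finset.disjoint_left]
    simp only [hF1, hF2, Finset.mem_image]
    rintro k ⟨c, _, rfl⟩ ⟨c', _, hc'⟩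
    injection hc' with h1 _
    exact absurd h1 (by decide)
  have d13 : Disjoint F1 F3 := by
    rw [Finset.disjoint_left]
    simp only [hF1, hF3, Finset.mem_image, Finset.mem_filter, List.mem_toFinset,
      Bool.not_eq_true', decide_eq_false_iff_not]
    rintro k ⟨c, ⟨_, hq⟩, rfl⟩ ⟨c', ⟨hc'S, _⟩, hc'⟩
    injection hc' with h1 h2; injection h2 with h2a h2b
    exact hq (by rw [← h2a, ← h2b]; exact hc'S)
  have d14 : Disjoint F1 F4 := by
    rw [Finset.disjoint_left]
    simp only [hF1, hF4, Finset.mem_image]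
    rintro k ⟨c, _, rfl⟩ ⟨c', _, hc'⟩
    injection hc' with h1 _
    exact absurd h1 (by decide)
  have d23 : Disjoint F2 F3 := by
    rw [Finset.disjoint_left]
    simp only [hF2, hF3, Finset.mem_image]
    rintro k ⟨c, _, rfl⟩ ⟨c', _, hc'⟩
    injection hc' with h1 _
    exact absurd h1 (by decide)
  have d24 : Disjoint F2 F4 := by
    rw [Finset.disjoint_left]
    simp only [hF2, hF4, Finset.mem_image, Finset.mem_filter, List.mem_toFinset,
      Bool.not_eq_true', decide_eq_false_iff_not]
    rintro k ⟨c, ⟨_, hq⟩, rfl⟩ ⟨c', ⟨hc'S, _⟩, hc'⟩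
    injection hc' with h1 h2; injection h2 with h2a h2b
    exact hq (by rw [← h2a, ← h2b]; exact hc'S)
  have d34 : Disjoint F3 F4 := by
    rw [Finset.disjoint_left]
    simp only [hF3, hF4, Finset.mem_image]
    rintro k ⟨c, _, rfl⟩ ⟨c', _, hc'⟩
    injection hc' with h1 _
    exact absurd h1 (by decide)
  have hdB : Disjoint (F1 ∪ F2) F3 := Finset.disjoint_union_left.mpr ⟨d13, d23⟩
  have hdA : Disjoint ((F1 ∪ F2) ∪ F3) F4 :=
    Finset.disjoint_union_left.mpr ⟨Finset.disjoint_union_left.mpr ⟨d14, d24⟩, d34⟩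
  rw [hLHS, key, Finset.card_union_of_disjoint hdA, Finset.card_union_of_disjoint hdB,
    Finset.card_union_of_disjoint d12, hF1, hF2, hF3, hF4,
    Finset.card_image_of_injective _ inj1, Finset.card_image_of_injective _ inj2,
    Finset.card_image_of_injective _ inj3, Finset.card_image_of_injective _ inj4,
    ← pv_countP_card L hL, ← pv_countP_card L hL, ← pv_countP_card L hL, ← pv_countP_card L hL]

-- ---- B's Counter loop, reduced to a countP over the distinct edges ----

lemma pv_hm_get (E : List (String × Int × Int)) (d : Std.HashMap (String × Int × Int) Int)
    (k : String × Int × Int) :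
    (E.foldl (fun d k => d.insert k (d.getD k 0 + 1)) d)[k]? =
    if k ∈ E then some (d.getD k 0 + (E.count k : Int)) else d[k]? := by
  induction E generalizing d with
  | nil => simp
  | cons a t ih =>
      rw [List.foldl_cons, ih]
      by_cases hkt : k ∈ t
      · rw [if_pos hkt, if_pos (List.mem_cons_of_mem a hkt)]
        by_cases hka : k = a
        · subst hka
          rw [Std.HashMap.getD_insert, List.count_cons]
          simp
          omega
        · rw [Std.HashMap.getD_insert]
          simp [Ne.symm hka]
      · rw [if_neg hkt]
        by_cases hka : k = a
        · subst hka
          rw [if_pos (List.mem_cons_self), Std.HashMap.getElem?_insert]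
          simp [List.count_eq_zero_of_not_mem hkt]
        · rw [if_neg (by simp [hka, hkt]), Std.HashMap.getElem?_insert]
          simp [Ne.symm hka]

lemma pv_B_eq (C : List (Int × Int)) :
    ((C.foldl (fun d c => (pvCellEdges c).foldl (fun d k => d.insert k (d.getD k 0 + 1)) d)
        (∅ : Std.HashMap (String × Int × Int) Int)).toList.foldl
      (fun s kv => if kv.2 == 1 then s + 1 else s) (0:Int))
    = ((PySem.Set.ofList (C.flatMap pvCellEdges)).countP
        (fun k => (C.flatMap pvCellEdges).count k == 1) : Nat) := by
  rw [← List.foldl_flatMap]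
  have hget : ∀ k, ((C.flatMap pvCellEdges).foldl (fun d k => d.insert k (d.getD k 0 + 1))
      (∅ : Std.HashMap (String × Int × Int) Int))[k]? =
      if k ∈ C.flatMap pvCellEdges then some (((C.flatMap pvCellEdges).count k : Nat) : Int)
      else none := by
    intro k
    rw [pv_hm_get]
    simp
  set M := (C.flatMap pvCellEdges).foldl (fun d k => d.insert k (d.getD k 0 + 1))
      (∅ : Std.HashMap (String × Int × Int) Int) with hM
  have hpair : ∀ kv : (String × Int × Int) × Int, kv ∈ M.toList ↔
      (kv.1 ∈ C.flatMap pvCellEdges ∧ kv.2 = ((C.flatMap pvCellEdges).count kv.1 : Int)) := by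
    intro kv
    obtain ⟨k, v⟩ := kv
    rw [Std.HashMap.mem_toList_iff_getElem?_eq_some, hget k]
    by_cases h : k ∈ C.flatMap pvCellEdges <;> simp [h, eq_comm]
  have hkeys_nodup : (M.toList.map (·.1)).Nodup := by
    have hd := @Std.HashMap.distinct_keys_toList _ _ _ _ M _ _
    have hp : (M.toList.map (·.1)).Pairwise (· ≠ ·) := by
      rw [List.pairwise_map]
      exact hd.imp (by intro a b hab; simpa using hab)
    exact hp
  have hkeys_mem : ∀ k, k ∈ M.toList.map (·.1) ↔ k ∈ C.flatMap pvCellEdges := by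
    intro k
    simp only [List.mem_map]
    constructor
    · rintro ⟨kv, hkv, rfl⟩
      exact ((hpair kv).mp hkv).1
    · intro hk
      exact ⟨(k, ((C.flatMap pvCellEdges).count k : Int)), (hpair _).mpr ⟨hk, rfl⟩, rfl⟩
  have hperm : (M.toList.map (·.1)).Perm (PySem.Set.ofList (C.flatMap pvCellEdges)) :=
    (List.perm_ext_iff_of_nodup hkeys_nodup (PySem.Set.nodup_ofList _)).mpr
      (fun k => (hkeys_mem k).trans (Iff.symm (PySem.Set.mem_ofList _ _)))
  rw [PySem.List.foldl_count_if]
  have hcongr : M.toList.countP (fun kv => kv.2 == 1) =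
      M.toList.countP (fun kv => ((C.flatMap pvCellEdges).count kv.1 : Int) == 1) := by
    apply List.countP_congr
    intro kv hkv
    rw [((hpair kv).mp hkv).2]
  rw [hcongr, show (fun kv : (String × Int × Int) × Int =>
      ((C.flatMap pvCellEdges).count kv.1 : Int) == 1)
      = (fun k : String × Int × Int => ((C.flatMap pvCellEdges).count k : Int) == 1) ∘ (·.1)
      from rfl, ← List.countP_map, hperm.countP_eq]
  have hp : ((PySem.Set.ofList (C.flatMap pvCellEdges)).countP
      (fun k => ((C.flatMap pvCellEdges).count k : Int) == 1)) =
      ((PySem.Set.ofList (C.flatMap pvCellEdges)).countP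
        (fun k => (C.flatMap pvCellEdges).count k == 1)) := by
    apply List.countP_congr
    intro k _
    simp only [beq_iff_eq, Nat.cast_eq_one]
  rw [hp]
  omega

-- A's loop over its hash set equals B's Counter computation, for any two equal cell sets
lemma pv_transport (SA SB : Std.HashSet (Int × Int))
    (hmem : ∀ c, c ∈ SA ↔ c ∈ SB) :
    (SA.toList.foldl (fun per c =>
      [((0:Int), (1:Int)), (1, 0), (0, -1), (-1, 0)].foldl
        (fun per d =>
          if SA.contains (c.1 + d.1, c.2 + d.2) then per else per + 1) per) 0)
    = ((SB.toList.foldl (fun d c => (pvCellEdges c).foldl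
          (fun d k => d.insert k (d.getD k 0 + 1)) d)
        (∅ : Std.HashMap (String × Int × Int) Int)).toList.foldl
        (fun s kv => if kv.2 == 1 then s + 1 else s) (0:Int)) := by
  have hA : SA.toList.Nodup := pv_toList_nodup SA
  have hB : SB.toList.Nodup := pv_toList_nodup SB
  have hmem' : ∀ c, c ∈ SA.toList ↔ c ∈ SB.toList := by
    intro c; rw [Std.HashSet.mem_toList, Std.HashSet.mem_toList]; exact hmem c
  have hperm : SA.toList.Perm SB.toList := (List.perm_ext_iff_of_nodup hA hB).mpr hmem'
  simp only [pv_contains_eq, decide_eq_true_eq]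
  rw [pv_sum_missing SA.toList SA.toList, pv_B_eq SB.toList, pv_main SB.toList hB]
  have conv1 : ∀ (f : Int × Int → Int × Int),
      SA.toList.countP (fun c => !decide (f c ∈ SA.toList)) =
      SB.toList.countP (fun c => !decide (f c ∈ SB.toList)) := by
    intro f
    rw [List.countP_congr (fun c _ => by
      rw [congrArg Bool.not (decide_eq_decide.mpr (hmem' (f c)))])]
    exact hperm.countP_eq _
  rw [conv1 (fun c => (c.1, c.2 + 1)), conv1 (fun c => (c.1 + 1, c.2)),
    conv1 (fun c => (c.1, c.2 - 1)), conv1 (fun c => (c.1 - 1, c.2))]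
  push_cast
  ring

-- ===== VERDICT (by name: the statement is the Claim_ definition above) =====
theorem calculate_perimeter_spec : Claim_equal_calculate_perimeter := by
  intro n m moves _
  unfold Spec_calculate_perimeter calculate_perimeter calculate_perimeter_alt
  refine pv_transport _ _ ?_
  intro c
  rw [pv_foldA_mem, pv_mem_foldl_insert _ (fun c => c), pvPositions]
  simp [Std.HashSet.not_mem_empty]
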